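-- pv_equiv track=rewrite | github.com/RoberTnf/dcss-analyzer | models.py | get_abbreviation
-- ===== SOURCE A (Python) =====
-- def get_abbreviation(string):
--     """From a race/background, returns its abbreviation.
--     Ex: Spriggan -> Sp
--           Enchanter -> En
--           Hill Orc -> Ho"""
--
--     # List of every race/background whose abbreviation isn't the first 2
--     # letters or the initials of two words
--     weird_abb = {"Demigod": "Dg", "Demonspawn": "Ds", "Draconian": "Dr",
--                  "Gargoyle": "Gr", "Merfolk": "Mf", "Octopode": "Op",
--                  "Vampire": "Vp", "Transmuter": "Tm", "Warper": "Wr",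
--                  "Wizard": "Wz", "Conjurer": "Cj", "Artificer": "Ar",
--                  "Wanderer": "Wn"}
--
--     if string in weird_abb.keys():
--         abbreviation = weird_abb[string]
--         string_cp = string
--
--     # we check for number of upper letters instead of spaces because some
--     # morgues are weird -> Chaos Knight as ChaosKnight -.-
--     elif sum(1 for c in string if c.isupper()) == 1:
--         abbreviation = string[:2]
--         string_cp = string
--     else:
--         abbreviation = string[0]
--         string_cp = string[0]
--         for c in string[1:]:
--             if c.isupper():
--                 abbreviation += c
--                 string_cp += " " + c
--             elif c != " ":
--                 string_cp += c
--
--     return abbreviation, string_cp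
-- ===== SOURCE B (Python) =====
-- def _segment(string):
--     """Split into words: a new word starts at index 0 and at every uppercase
--     character; spaces are dropped from word bodies."""
--     if string == "":
--         return []
--     words = []
--     word = string[0]
--     for c in string[1:]:
--         if c.isupper():
--             words.append(word)
--             word = c
--         elif c != " ":
--             word += c
--     words.append(word)
--     return words
--
--
-- def get_abbreviation(string):
--     """From a race/background, returns its abbreviation (word-segmentation version)."""
--     weird_abb = {"Demigod": "Dg", "Demonspawn": "Ds", "Draconian": "Dr",
--                  "Gargoyle": "Gr", "Merfolk": "Mf", "Octopode": "Op",
--                  "Vampire": "Vp", "Transmuter": "Tm", "Warper": "Wr",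
--                  "Wizard": "Wz", "Conjurer": "Cj", "Artificer": "Ar",
--                  "Wanderer": "Wn"}
--
--     if string in weird_abb:
--         return weird_abb[string], string
--     if sum(map(str.isupper, string)) == 1:
--         return string[:2], string
--     words = _segment(string)
--     return "".join(w[:1] for w in words), " ".join(words)
-- ===== Notes on version B (the rewrite author's own statement) =====
-- stated objective: alternative
-- what changed: The fused single-pass accumulation of abbreviation and string_cp is replaced by an explicit word-segmentation pass (a word starts at index 0 and at every uppercase character, spaces dropped), from which both results are derived by two joins.
import Mathlib
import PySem

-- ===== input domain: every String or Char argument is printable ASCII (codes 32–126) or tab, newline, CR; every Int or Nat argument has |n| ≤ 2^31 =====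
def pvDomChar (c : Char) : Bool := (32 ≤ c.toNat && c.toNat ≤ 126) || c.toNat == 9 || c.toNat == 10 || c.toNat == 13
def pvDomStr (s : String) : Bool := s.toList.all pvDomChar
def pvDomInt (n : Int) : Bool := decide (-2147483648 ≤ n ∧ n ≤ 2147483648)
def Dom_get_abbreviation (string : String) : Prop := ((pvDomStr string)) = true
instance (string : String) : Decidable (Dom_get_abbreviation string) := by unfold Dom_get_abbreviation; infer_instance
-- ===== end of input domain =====

-- B replaces A's fused abbreviation/string_cp accumulation by an explicit word-segmentation
-- pass whose two joins derive both results (objective: alternative decomposition, same cost).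


-- ===== PORT A =====
def pvWeirdAbb : PySem.Dict String String :=
  PySem.Dict.ofList [("Demigod", "Dg"), ("Demonspawn", "Ds"), ("Draconian", "Dr"),
    ("Gargoyle", "Gr"), ("Merfolk", "Mf"), ("Octopode", "Op"),
    ("Vampire", "Vp"), ("Transmuter", "Tm"), ("Warper", "Wr"),
    ("Wizard", "Wz"), ("Conjurer", "Cj"), ("Artificer", "Ar"),
    ("Wanderer", "Wn")]

def get_abbreviation (string : String) : String × String :=
  if pvWeirdAbb.contains string then
    (pvWeirdAbb.getD string "", string)
  else if string.toList.foldl (fun n c => if PySem.Chars.isupper c then n + 1 else n) (0 : Int) = 1 then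
    (String.ofList (PySem.Chars.slice string.toList none (some 2)), string)
  else
    match string.toList with
    | [] => ("", "")  -- string[0] raises IndexError here; excluded by Pre_
    | c0 :: rest =>
      let (abb, cp) := rest.foldl
        (fun (st : List Char × List Char) c =>
          if PySem.Chars.isupper c then (st.1 ++ [c], st.2 ++ [' ', c])
          else if c ≠ ' ' then (st.1, st.2 ++ [c])
          else st)
        ([c0], [c0])
      (String.ofList abb, String.ofList cp)

-- ===== PORT B =====
-- the table Source B writes as a dict, held as the association list it denotes
def pvWeirdPairs : List (String × String) :=
  [("Demigod", "Dg"), ("Demonspawn", "Ds"), ("Draconian", "Dr"),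
   ("Gargoyle", "Gr"), ("Merfolk", "Mf"), ("Octopode", "Op"),
   ("Vampire", "Vp"), ("Transmuter", "Tm"), ("Warper", "Wr"),
   ("Wizard", "Wz"), ("Conjurer", "Cj"), ("Artificer", "Ar"),
   ("Wanderer", "Wn")]

-- _segment: a word starts at index 0 and at every uppercase char; spaces are dropped
def pvSegment (string : String) : List (List Char) :=
  match string.toList with
  | [] => []
  | c0 :: rest =>
    let (words, word) := rest.foldl
      (fun (st : List (List Char) × List Char) c =>
        if PySem.Chars.isupper c then (st.1 ++ [st.2], [c])
        else if c ≠ ' ' then (st.1, st.2 ++ [c])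
        else st)
      ([], [c0])
    words ++ [word]

def get_abbreviation_alt (string : String) : String × String :=
  match pvWeirdPairs.lookup string with
  | some a => (a, string)
  | none =>
    if string.toList.countP PySem.Chars.isupper = 1 then
      (String.ofList (string.toList.take 2), string)
    else
      let words := pvSegment string
      (String.ofList (PySem.Chars.join [] (words.map (·.take 1))),
       String.ofList (PySem.Chars.join [' '] words))

-- ===== PRECONDITION & SPEC =====
-- Pre_ excludes only the empty string, on which A raises IndexError (string[0]).
def Pre_get_abbreviation (string : String) : Prop := string ≠ ""
instance (string : String) : Decidable (Pre_get_abbreviation string) := by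
  unfold Pre_get_abbreviation; infer_instance

def pvWitness_get_abbreviation : String := "Hill Orc"

def Spec_get_abbreviation (string : String) (out : String × String) : Prop :=
  out = get_abbreviation_alt string
instance (string : String) (out : String × String) : Decidable (Spec_get_abbreviation string out) := by
  unfold Spec_get_abbreviation; infer_instance

-- ===== CLAIM (what is proved, stated in full; the proofs are below) =====
def Claim_equal_get_abbreviation : Prop :=
  ∀ (string : String), Dom_get_abbreviation string → Pre_get_abbreviation string →
    Spec_get_abbreviation string (get_abbreviation string)

-- ===== LEMMAS AND PROOFS =====

theorem join_nil_eq_flatten (l : List (List Char)) :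
    PySem.Chars.join [] l = l.flatten := by
  induction l with
  | nil => simp [PySem.Chars.join_nil]
  | cons a t ih =>
    cases t with
    | nil => simp [PySem.Chars.join_singleton]
    | cons b u => simp [PySem.Chars.join_cons_cons, ih]

theorem join_space_append_singleton (ws : List (List Char)) (w : List Char) (h : ws ≠ []) :
    PySem.Chars.join [' '] (ws ++ [w]) = PySem.Chars.join [' '] ws ++ ' ' :: w := by
  induction ws with
  | nil => exact absurd rfl h
  | cons a t ih =>
    cases t with
    | nil => simp [PySem.Chars.join_cons_cons, PySem.Chars.join_singleton]
    | cons b u =>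
      have h' := ih (by simp)
      simp only [List.cons_append] at h' ⊢
      rw [PySem.Chars.join_cons_cons, PySem.Chars.join_cons_cons, h']
      simp

theorem join_space_last_append (ws : List (List Char)) (w x : List Char) :
    PySem.Chars.join [' '] (ws ++ [w ++ x]) = PySem.Chars.join [' '] (ws ++ [w]) ++ x := by
  induction ws with
  | nil => simp [PySem.Chars.join_singleton]
  | cons a t ih =>
    cases t with
    | nil =>
      simp [PySem.Chars.join_cons_cons, PySem.Chars.join_singleton]
    | cons b u =>
      have h' := ih
      simp only [List.cons_append] at h' ⊢
      rw [PySem.Chars.join_cons_cons, PySem.Chars.join_cons_cons, h']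
      simp

-- the two loops compute the same pair, through the segmentation invariant
theorem loop_rel (rest : List Char) :
    ∀ (words : List (List Char)) (word : List Char), word ≠ [] →
    rest.foldl
      (fun (st : List Char × List Char) c =>
        if PySem.Chars.isupper c then (st.1 ++ [c], st.2 ++ [' ', c])
        else if c ≠ ' ' then (st.1, st.2 ++ [c])
        else st)
      (((words ++ [word]).map (·.take 1)).flatten, PySem.Chars.join [' '] (words ++ [word]))
    =
    (fun (p : List (List Char) × List Char) =>
      (((p.1 ++ [p.2]).map (·.take 1)).flatten, PySem.Chars.join [' '] (p.1 ++ [p.2])))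
    (rest.foldl
      (fun (st : List (List Char) × List Char) c =>
        if PySem.Chars.isupper c then (st.1 ++ [st.2], [c])
        else if c ≠ ' ' then (st.1, st.2 ++ [c])
        else st)
      (words, word)) := by
  induction rest with
  | nil => intro words word _; rfl
  | cons c cs ih =>
    intro words word hw
    have hne : words ++ [word] ≠ [] := by simp [List.append_eq_nil_iff]
    simp only [List.foldl_cons]
    by_cases hu : PySem.Chars.isupper c
    · rw [if_pos hu, if_pos hu]
      have h1 : (((words ++ [word]).map (·.take 1)).flatten ++ [c],
                 PySem.Chars.join [' '] (words ++ [word]) ++ [' ', c])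
              = ((((words ++ [word]) ++ [[c]]).map (·.take 1)).flatten,
                 PySem.Chars.join [' '] ((words ++ [word]) ++ [[c]])) := by
        rw [join_space_append_singleton (words ++ [word]) [c] hne]
        simp
      rw [h1, ih (words ++ [word]) [c] (by simp)]
    · rw [if_neg hu, if_neg hu]
      by_cases hs : c = ' '
      · rw [if_neg (by simp [hs]), if_neg (by simp [hs])]
        exact ih words word hw
      · rw [if_pos (by simp [hs]), if_pos (by simp [hs])]
        have ht : (word ++ [c]).take 1 = word.take 1 := by
          cases word with
          | nil => exact absurd rfl hw
          | cons d t => simp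
        have h2 : (((words ++ [word]).map (·.take 1)).flatten,
                   PySem.Chars.join [' '] (words ++ [word]) ++ [c])
                = (((words ++ [word ++ [c]]).map (·.take 1)).flatten,
                   PySem.Chars.join [' '] (words ++ [word ++ [c]])) := by
          rw [join_space_last_append words word [c]]
          simp [ht]
        rw [h2, ih words (word ++ [c]) (by simp)]

theorem dict_mk_get?_lookup (l : List (String × String)) (s : String) :
    (PySem.Dict.mk l).get? s = l.lookup s := by
  induction l with
  | nil => rfl
  | cons p t ih =>
    rcases p with ⟨k, v⟩
    rw [PySem.Dict.get?_mk_cons, List.lookup, ih]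
    by_cases h : s = k
    · simp [h]
    · rw [beq_eq_false_iff_ne.mpr h, beq_eq_false_iff_ne.mpr (Ne.symm h)]
      simp

-- ===== VERDICT (by name: the statement is the Claim_ definition above) =====
theorem get_abbreviation_spec : Claim_equal_get_abbreviation := by
  intro string _ hpre
  unfold Spec_get_abbreviation get_abbreviation get_abbreviation_alt
  have hd : pvWeirdAbb = PySem.Dict.mk pvWeirdPairs := by rfl
  rw [PySem.Dict.contains_eq_isSome_get?, hd, dict_mk_get?_lookup]
  cases hlk : pvWeirdPairs.lookup string with
  | some a =>
    simp only [Option.isSome_some, if_true]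
    rw [PySem.Dict.getD_eq_get?_getD, dict_mk_get?_lookup, hlk]
    rfl
  | none =>
    simp only [Option.isSome_none, Bool.false_eq_true, if_false]
    have hcnt : string.toList.foldl
        (fun n c => if PySem.Chars.isupper c then n + 1 else n) (0 : Int)
        = ((string.toList.countP PySem.Chars.isupper : Nat) : Int) := by
      simpa using PySem.List.foldl_count_if PySem.Chars.isupper string.toList 0
    rw [hcnt]
    by_cases hc : string.toList.countP PySem.Chars.isupper = 1
    · rw [if_pos (by exact_mod_cast hc), if_pos hc]
      have hsl : PySem.Chars.slice string.toList none (some 2) = string.toList.take 2 := by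
        simpa using PySem.List.slice_to_natCast (xs := string.toList) (b := 2)
      rw [hsl]
    · rw [if_neg (fun h => hc (by exact_mod_cast h)), if_neg hc]
      unfold pvSegment
      cases hcs : string.toList with
      | nil => exact absurd (String.toList_eq_nil_iff.mp hcs) hpre
      | cons c0 rest =>
        have hrel := loop_rel rest [] [c0] (by simp)
        have hinit : ((([] ++ [[c0]]).map (fun w : List Char => w.take 1)).flatten,
            PySem.Chars.join [' '] ([] ++ [[c0]])) = (([c0] : List Char), ([c0] : List Char)) := by
          simp [PySem.Chars.join_singleton]
        rw [hinit] at hrel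
        rcases hfd : rest.foldl
          (fun (st : List (List Char) × List Char) c =>
            if PySem.Chars.isupper c then (st.1 ++ [st.2], [c])
            else if c ≠ ' ' then (st.1, st.2 ++ [c])
            else st) ([], [c0]) with ⟨ws, w⟩
        rw [hfd] at hrel
        simp only [hrel, hfd]
        simp [join_nil_eq_flatten]
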